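-- pv_equiv track=rewrite | github.com/daepung1/Algorithm | 부족한 금액 계산하기.py | solution
-- ===== SOURCE A (Python) =====
-- def solution(price, money, count):
--     all_price=0
--
--     for i in range(count):
--         all_price=all_price+(i+1)*price
--     if all_price-money>0:
--         return all_price-money
--     else:
--         return 0
-- ===== SOURCE B (Python) =====
-- def solution(price, money, count):
--     n = max(count, 0)
--     return max(price * n * (n + 1) // 2 - money, 0)
-- ===== Notes on version B (the rewrite author's own statement) =====
-- stated objective: faster
-- what changed: replaces the O(count) accumulation loop with the closed-form triangular sum price*count*(count+1)//2
import Mathlib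
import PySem

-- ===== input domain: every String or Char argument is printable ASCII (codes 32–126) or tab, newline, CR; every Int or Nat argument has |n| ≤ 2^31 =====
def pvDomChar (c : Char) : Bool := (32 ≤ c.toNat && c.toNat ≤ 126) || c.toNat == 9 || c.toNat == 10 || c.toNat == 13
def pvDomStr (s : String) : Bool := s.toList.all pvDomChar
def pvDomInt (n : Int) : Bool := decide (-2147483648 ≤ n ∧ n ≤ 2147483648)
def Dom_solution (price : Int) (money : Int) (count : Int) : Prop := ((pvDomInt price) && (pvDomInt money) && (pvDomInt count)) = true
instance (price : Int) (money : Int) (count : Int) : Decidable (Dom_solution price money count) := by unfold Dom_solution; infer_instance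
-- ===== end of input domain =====

-- B replaces A's O(count) accumulation loop by the closed-form triangular sum (O(1)).

-- ===== PORT A =====
def solution (price : Int) (money : Int) (count : Int) : Int :=
  let all_price := (PySem.List.pyRange 0 count 1).foldl (fun acc i => acc + (i + 1) * price) 0
  if all_price - money > 0 then all_price - money else 0

-- ===== PORT B =====
def solution_alt (price : Int) (money : Int) (count : Int) : Int :=
  let n := max count 0
  max (PySem.Int.floordiv (price * n * (n + 1)) 2 - money) 0

-- ===== PRECONDITION & SPEC =====
def Spec_solution (price : Int) (money : Int) (count : Int) (out : Int) : Prop := out = solution_alt price money count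
instance (price : Int) (money : Int) (count : Int) (out : Int) : Decidable (Spec_solution price money count out) := by unfold Spec_solution; infer_instance

-- ===== CLAIM (what is proved, stated in full; the proofs are below) =====
def Claim_equal_solution : Prop := ∀ (price : Int) (money : Int) (count : Int), Dom_solution price money count → Spec_solution price money count (solution price money count)

-- ===== LEMMAS AND PROOFS =====

-- loop invariant: twice the accumulated sum is the triangular closed form
theorem pv_loop_sum (price : Int) (n : Nat) :
    2 * (PySem.List.pyRange 0 (n : Int) 1).foldl (fun acc i => acc + (i + 1) * price) 0
      = price * (n : Int) * ((n : Int) + 1) := by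
  induction n with
  | zero => simp
  | succ k ih =>
    have h : PySem.List.pyRange 0 ((k : Int) + 1) 1
        = PySem.List.pyRange 0 (k : Int) 1 ++ [(k : Int)] :=
      PySem.List.pyRange_one_succ_right (by positivity)
    push_cast
    rw [h, List.foldl_append]
    simp only [List.foldl_cons, List.foldl_nil]
    push_cast at ih
    ring_nf
    ring_nf at ih
    linarith

theorem pv_sum_eq (price : Int) (count : Int) :
    (PySem.List.pyRange 0 count 1).foldl (fun acc i => acc + (i + 1) * price) 0
      = PySem.Int.floordiv (price * max count 0 * (max count 0 + 1)) 2 := by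
  rw [PySem.Int.floordiv_eq_ediv_of_pos (by norm_num)]
  rcases le_or_gt count 0 with h | h
  · rw [PySem.List.pyRange_one_eq_nil (by omega)]
    simp [max_eq_right h]
  · have hm : max count 0 = count := max_eq_left h.le
    rw [hm]
    obtain ⟨n, rfl⟩ : ∃ n : Nat, count = (n : Int) := ⟨count.toNat, (Int.toNat_of_nonneg h.le).symm⟩
    have := pv_loop_sum price n
    omega

-- ===== VERDICT (by name: the statement is the Claim_ definition above) =====
theorem solution_spec : Claim_equal_solution := by
  intro price money count _
  unfold Spec_solution solution solution_alt
  rw [pv_sum_eq]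
  simp only []
  omega
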